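-- pv_equiv track=rewrite | github.com/CovertRob/LS-Backend-Core | PY110/lesson_1/pedac_video.py | sum_even_number_row
-- ===== SOURCE A (Python) =====
-- def sum_even_number_row(row_number):
--     rows = []
--     start_integer = 2
--     for row_length in range(1, row_number + 1):
--         row = create_row(start_integer, row_length)
--         rows.append(row)
--         start_integer = row[-1] + 2
--     return sum(rows[-1])
--
-- def create_row(start_integer, row_length):
--     row = []
--     current_integer = start_integer
--     while len(row) < row_length:
--         row.append(current_integer)
--         current_integer += 2
--     return row
-- ===== SOURCE B (Python) =====
-- def sum_even_number_row(row_number):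
--     # Closed form: row n holds n consecutive even numbers ending at n*(n+1),
--     # so its sum is n*(n**2+1) = n**3 + n.
--     return row_number ** 3 + row_number
-- ===== Notes on version B (the rewrite author's own statement) =====
-- stated objective: faster
-- what changed: Replaces the O(n^2) construction of the whole triangle of even numbers with the closed-form sum n**3 + n of the n consecutive even numbers in the last row.
-- outside the precondition, e.g. on sum_even_number_row(0): A raises IndexError, B returns 0
import Mathlib
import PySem

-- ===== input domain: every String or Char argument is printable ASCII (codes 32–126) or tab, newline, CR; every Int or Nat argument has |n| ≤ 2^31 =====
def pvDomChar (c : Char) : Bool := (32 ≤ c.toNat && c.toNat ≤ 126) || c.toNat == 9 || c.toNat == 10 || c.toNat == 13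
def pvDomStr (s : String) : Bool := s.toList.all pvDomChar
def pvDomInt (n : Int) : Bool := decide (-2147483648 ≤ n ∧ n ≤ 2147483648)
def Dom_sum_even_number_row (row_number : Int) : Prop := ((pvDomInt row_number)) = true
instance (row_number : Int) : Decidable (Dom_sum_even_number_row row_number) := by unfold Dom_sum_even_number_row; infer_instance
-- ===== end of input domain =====

-- B replaces A's O(n^2) construction of the triangle of even numbers by the
-- closed form n^3 + n for the sum of the last row (objective: faster).

-- ===== PORT A =====
-- helper: Python's `while len(row) < row_length` append loop; the remaining
-- iteration count row_length - len(row) is the structural fuel.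
def createRowAux : Nat → Int → List Int → List Int
  | 0, _, acc => acc
  | k+1, c, acc => createRowAux k (c + 2) (acc ++ [c])

def create_row (start_integer row_length : Int) : List Int :=
  createRowAux row_length.toNat start_integer []  -- runs max(row_length,0) times, exactly like the while loop

def sumEvenStep (s : List (List Int) × Int) (row_length : Int) : List (List Int) × Int :=
  let row := create_row s.2 row_length
  (s.1 ++ [row], PySem.List.pyGetD row (-1) 0 + 2)  -- row[-1] is in range: row_length ≥ 1 in the loop

def sum_even_number_row (row_number : Int) : Int :=
  let st := (PySem.List.pyRange 1 (row_number + 1) 1).foldl sumEvenStep ([], 2)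
  (PySem.List.pyGetD st.1 (-1) []).sum  -- rows[-1]: in range exactly when Pre_ holds

-- ===== PORT B =====
def sum_even_number_row_alt (row_number : Int) : Int :=
  row_number ^ 3 + row_number

-- ===== PRECONDITION & SPEC =====
-- For row_number ≤ 0 the loop never runs and Python's rows[-1] raises IndexError.
def Pre_sum_even_number_row (row_number : Int) : Prop := 1 ≤ row_number
instance (row_number : Int) : Decidable (Pre_sum_even_number_row row_number) := by
  unfold Pre_sum_even_number_row; infer_instance

def pvWitness_sum_even_number_row : Int := 3

def Spec_sum_even_number_row (row_number : Int) (out : Int) : Prop :=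
  out = sum_even_number_row_alt row_number
instance (row_number : Int) (out : Int) : Decidable (Spec_sum_even_number_row row_number out) := by
  unfold Spec_sum_even_number_row; infer_instance

-- ===== CLAIM (what is proved, stated in full; the proofs are below) =====
def Claim_equal_sum_even_number_row : Prop :=
  ∀ (row_number : Int), Dom_sum_even_number_row row_number →
    Pre_sum_even_number_row row_number →
    Spec_sum_even_number_row row_number (sum_even_number_row row_number)

-- ===== LEMMAS AND PROOFS =====

lemma crA_sum (k : Nat) : ∀ (c : Int) (acc : List Int),
    (createRowAux k c acc).sum = acc.sum + (k : Int) * c + (k : Int) * ((k : Int) - 1) := by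
  induction k with
  | zero => intro c acc; simp [createRowAux]
  | succ k ih =>
    intro c acc
    simp only [createRowAux, ih]
    simp [List.sum_append]
    ring

lemma crA_last (k : Nat) : ∀ (c : Int) (acc : List Int),
    PySem.List.pyGetD (createRowAux (k + 1) c acc) (-1) 0 = c + 2 * (k : Int) := by
  induction k with
  | zero =>
    intro c acc
    simp [createRowAux, PySem.List.pyGetD_neg_one_append_singleton]
  | succ k ih =>
    intro c acc
    show PySem.List.pyGetD (createRowAux (k + 1) (c + 2) (acc ++ [c])) (-1) 0 = _
    rw [ih]
    push_cast
    ring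

def loopState (k : Nat) : List (List Int) × Int :=
  (PySem.List.pyRange 1 ((k : Int) + 1) 1).foldl sumEvenStep ([], 2)

lemma loop_inv (k : Nat) (hk : 1 ≤ k) :
    (loopState k).2 = (k : Int) * ((k : Int) + 1) + 2 ∧
    PySem.List.pyGetD (loopState k).1 (-1) []
      = create_row ((k : Int) * ((k : Int) - 1) + 2) (k : Int) := by
  induction k with
  | zero => omega
  | succ k ih =>
    by_cases hk1 : 1 ≤ k
    · obtain ⟨h2, h1⟩ := ih hk1
      have hsplit : PySem.List.pyRange 1 ((↑(k + 1) : Int) + 1) 1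
          = PySem.List.pyRange 1 ((k : Int) + 1) 1 ++ [(k : Int) + 1] := by
        have : ((↑(k + 1) : Int) + 1) = ((k : Int) + 1) + 1 := by push_cast; ring
        rw [this, PySem.List.pyRange_one_succ_right (by omega)]
      have hstate : loopState (k + 1) = sumEvenStep (loopState k) ((k : Int) + 1) := by
        unfold loopState
        rw [hsplit, List.foldl_append]
        rfl
      have hrow : create_row (loopState k).2 ((k : Int) + 1)
          = createRowAux (k + 1) ((k : Int) * ((k : Int) + 1) + 2) [] := by
        rw [h2]
        unfold create_row
        congr 1
      constructor
      · rw [hstate]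
        show PySem.List.pyGetD (create_row (loopState k).2 ((k : Int) + 1)) (-1) 0 + 2 = _
        rw [hrow, crA_last]
        push_cast
        ring
      · rw [hstate]
        show PySem.List.pyGetD ((loopState k).1 ++ [create_row (loopState k).2 ((k : Int) + 1)]) (-1) []
            = _
        rw [PySem.List.pyGetD_neg_one_append_singleton, hrow]
        unfold create_row
        have ht : ((↑(k + 1) : Int)).toNat = k + 1 := by omega
        rw [ht]
        congr 1
        push_cast
        ring
    · have hk0 : k = 0 := by omega
      subst hk0
      decide

-- ===== VERDICT (by name: the statement is the Claim_ definition above) =====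
theorem sum_even_number_row_spec : Claim_equal_sum_even_number_row := by
  intro n _ hpre
  unfold Spec_sum_even_number_row sum_even_number_row sum_even_number_row_alt
  have hk : 1 ≤ n.toNat := by
    unfold Pre_sum_even_number_row at hpre; omega
  have hn : (n.toNat : Int) = n := by
    unfold Pre_sum_even_number_row at hpre; omega
  have h := (loop_inv n.toNat hk).2
  have hls : (PySem.List.pyRange 1 (n + 1) 1).foldl sumEvenStep ([], 2) = loopState n.toNat := by
    unfold loopState; rw [hn]
  simp only [hls, h]
  unfold create_row
  rw [show ((n.toNat : Int)).toNat = n.toNat by omega, crA_sum]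
  rw [List.sum_nil, hn]
  ring
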